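-- pv_equiv track=rewrite | github.com/MrSurajOp/RDNCai | AOstarAlgorithm.py | ao_star
-- ===== SOURCE A (Python) =====
-- class AOStarNode:
--     def __init__(self, name, heuristic=0):
--         self.name = name
--         self.heuristic = heuristic
--         self.children = []
--         self.parent = None
--
-- def ao_star(start_name, goal_name, graph, heuristics):
--     open_list = [AOStarNode(start_name, heuristics.get(start_name, float('inf')))]
--     closed_list = set()
--
--     while open_list:
--         current_node = open_list.pop(0)
--
--         if current_node.name == goal_name:
--             path = []
--             while current_node:
--                 path.append(current_node.name)
--                 current_node = current_node.parent
--             return path[::-1]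
--
--         closed_list.add(current_node.name)
--
--         for child_name in graph.get(current_node.name, []):
--             if child_name in closed_list:
--                 continue
--
--             child_node = AOStarNode(child_name, heuristics.get(child_name, float('inf')))
--             child_node.parent = current_node
--             open_list.append(child_node)
--
--     return None
-- ===== SOURCE B (Python) =====
-- def ao_star(start_name, goal_name, graph, heuristics):
--     # Layered BFS in two phases: grow whole frontier layers (no queue, no parent
--     # pointers), then rebuild the path back-to-front by scanning each earlier
--     # layer for the first node adjacent to the one chosen after it.
--     layers = [[start_name]]
--     seen = {start_name}
--     while goal_name not in layers[-1]:
--         frontier = []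
--         for u in layers[-1]:
--             for v in graph.get(u, []):
--                 if v not in seen:
--                     seen.add(v)
--                     frontier.append(v)
--         if not frontier:
--             return None
--         layers.append(frontier)
--     path = [goal_name]
--     for layer in reversed(layers[:-1]):
--         path.append(next(u for u in layer if path[-1] in graph.get(u, [])))
--     return path[::-1]
-- ===== Notes on version B (the rewrite author's own statement) =====
-- stated objective: alternative
-- what changed: Replaces A's node-object FIFO queue (which re-enqueues duplicates, re-expands closed names and carries parent pointers for path recovery) by a two-phase layered BFS: phase one grows whole frontier layers with a seen-set and no parent bookkeeping at all; phase two rebuilds the path back-to-front by scanning each earlier layer for the first node adjacent to the node chosen after it; the unused heuristic is dropped.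
import Mathlib
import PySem

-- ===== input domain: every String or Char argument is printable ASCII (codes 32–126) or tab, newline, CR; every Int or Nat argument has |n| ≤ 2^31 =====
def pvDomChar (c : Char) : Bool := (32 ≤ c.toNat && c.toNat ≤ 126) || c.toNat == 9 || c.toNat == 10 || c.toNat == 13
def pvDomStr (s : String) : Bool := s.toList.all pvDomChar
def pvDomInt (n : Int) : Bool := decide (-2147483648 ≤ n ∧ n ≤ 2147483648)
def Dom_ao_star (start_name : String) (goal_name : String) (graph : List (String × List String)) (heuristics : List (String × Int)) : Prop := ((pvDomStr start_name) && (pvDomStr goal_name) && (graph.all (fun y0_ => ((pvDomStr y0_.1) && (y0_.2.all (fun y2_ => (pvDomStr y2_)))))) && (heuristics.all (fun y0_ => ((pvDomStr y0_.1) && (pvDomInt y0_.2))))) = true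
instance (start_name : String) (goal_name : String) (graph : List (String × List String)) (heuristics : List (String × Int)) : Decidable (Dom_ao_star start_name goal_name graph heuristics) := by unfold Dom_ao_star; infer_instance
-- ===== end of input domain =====

-- B replaces A's node-object FIFO queue (duplicate re-enqueuing, re-expansion of closed
-- names, parent pointers) by a two-phase layered BFS: grow whole frontier layers with a
-- seen-set only, then rebuild the path back-to-front by scanning each earlier layer for
-- the first node adjacent to the node chosen after it (alternative algorithm, same value).
-- The heuristic is stored by A but never read, so both ports omit it.

-- ===== PORT A =====
-- A node object is ported as (name, list of ancestor names): the parent-pointer chain.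
-- graph.get(x, []) on the association list (first match, as a Python dict):
def pvGet (graph : List (String × List String)) (x : String) : List String :=
  PySem.Dict.getD (PySem.Dict.mk graph) x []

def pvNames (open_ : List (String × List String)) : List String := open_.map Prod.fst

-- Termination-measure helpers for A's loop (A re-expands popped duplicates, so the
-- measure is Σ over open nodes of M^(2k+δ), k = undiscovered names, δ = name closed).
def pvU (graph : List (String × List String)) : List String := graph.flatMap Prod.snd
def pvM (graph : List (String × List String)) : Nat :=
  (graph.map (fun p => p.2.length)).foldr max 0 + 2
def pvK (graph : List (String × List String)) (open_ : List (String × List String))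
    (closed : List String) : Nat :=
  ((pvU graph ++ pvNames open_).toFinset.filter (fun x => x ∉ closed)).card
def pvPhi (graph : List (String × List String)) (open_ : List (String × List String))
    (closed : List String) : Nat :=
  (open_.map (fun n => pvM graph ^ (2 * pvK graph open_ closed + (if n.1 ∈ closed then 1 else 0)))).sum

lemma pvGet_subset_U (graph : List (String × List String)) (x : String) :
    ∀ ch ∈ pvGet graph x, ch ∈ pvU graph := by
  intro ch hch
  unfold pvGet at hch
  rw [PySem.Dict.getD_eq_get?_getD] at hch
  cases hg : (PySem.Dict.mk graph).get? x with
  | none => simp [hg] at hch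
  | some v =>
    have hm := PySem.Dict.mem_items_of_get?_eq_some (PySem.Dict.mk graph) hg
    simp only [hg, Option.getD_some] at hch
    simp only [PySem.Dict.items] at hm
    exact List.mem_flatMap.2 ⟨(x, v), hm, hch⟩

lemma pv_le_foldr_max (l : List Nat) (a : Nat) (h : a ∈ l) : a ≤ l.foldr max 0 := by
  induction l with
  | nil => cases h
  | cons b l ih =>
    rcases List.mem_cons.1 h with rfl | h
    · exact le_max_left _ _
    · exact le_trans (ih h) (le_max_right _ _)

lemma pvGet_len_le (graph : List (String × List String)) (x : String) :
    (pvGet graph x).length + 2 ≤ pvM graph := by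
  unfold pvGet pvM
  rw [PySem.Dict.getD_eq_get?_getD]
  cases hg : (PySem.Dict.mk graph).get? x with
  | none => simp
  | some v =>
    have hm := PySem.Dict.mem_items_of_get?_eq_some (PySem.Dict.mk graph) hg
    simp only [PySem.Dict.items] at hm
    have : v.length ∈ graph.map (fun p => p.2.length) := List.mem_map.2 ⟨(x, v), hm, rfl⟩
    have := pv_le_foldr_max _ _ this
    simp only [Option.getD_some]
    omega

lemma pvM_ge (graph : List (String × List String)) : 2 ≤ pvM graph := by
  unfold pvM; omega

lemma pvK_le (graph : List (String × List String)) (o1 o2 : List (String × List String))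
    (c1 c2 : List String)
    (h : ∀ x, x ∈ pvU graph ++ pvNames o1 → x ∉ c1 →
          x ∈ pvU graph ++ pvNames o2 ∧ x ∉ c2) :
    pvK graph o1 c1 ≤ pvK graph o2 c2 := by
  apply Finset.card_le_card
  intro x hx
  simp only [Finset.mem_filter, List.mem_toFinset] at hx ⊢
  exact ⟨(h x hx.1 hx.2).1, (h x hx.1 hx.2).2⟩

lemma pvK_lt (graph : List (String × List String)) (o1 o2 : List (String × List String))
    (c1 c2 : List String)
    (h : ∀ x, x ∈ pvU graph ++ pvNames o1 → x ∉ c1 →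
          x ∈ pvU graph ++ pvNames o2 ∧ x ∉ c2)
    (w : String) (hw2 : w ∈ pvU graph ++ pvNames o2) (hw2c : w ∉ c2) (hw1 : w ∈ c1) :
    pvK graph o1 c1 < pvK graph o2 c2 := by
  apply Finset.card_lt_card
  rw [Finset.ssubset_iff_of_subset]
  · exact ⟨w, by simp only [Finset.mem_filter, List.mem_toFinset]; exact ⟨hw2, hw2c⟩,
      by simp only [Finset.mem_filter, List.mem_toFinset, not_and]; intro _; exact fun hc => hc hw1⟩
  · intro x hx
    simp only [Finset.mem_filter, List.mem_toFinset] at hx ⊢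
    exact ⟨(h x hx.1 hx.2).1, (h x hx.1 hx.2).2⟩

lemma pv_sum_const {α : Type} (l : List α) (a : Nat) :
    (l.map (fun _ => a)).sum = l.length * a := by
  induction l with
  | nil => simp
  | cons x l ih => simp [ih, Nat.succ_mul, Nat.add_comm]

lemma pvPhi_dec_mem (graph : List (String × List String)) (c : String) (anc : List String)
    (rest : List (String × List String)) (closed : List String) (kidnames : List String)
    (hU : ∀ ch ∈ kidnames, ch ∈ pvU graph)
    (hlen : kidnames.length + 2 ≤ pvM graph)
    (hnc : ∀ ch ∈ kidnames, ch ∉ closed)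
    (hc : c ∈ closed) :
    pvPhi graph (rest ++ kidnames.map (fun ch => (ch, c :: anc))) closed
      < pvPhi graph ((c, anc) :: rest) closed := by
  have hM := pvM_ge graph
  set M := pvM graph with hMdef
  set o2 := (c, anc) :: rest with ho2
  set o1 := rest ++ kidnames.map (fun ch => (ch, c :: anc)) with ho1
  have hnames : pvNames o1 = pvNames rest ++ kidnames := by
    simp [pvNames, ho1, Function.comp_def]
  have hk : pvK graph o1 closed ≤ pvK graph o2 closed := by
    apply pvK_le
    intro x hx hxc
    refine ⟨?_, hxc⟩
    rcases List.mem_append.1 hx with h | h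
    · exact List.mem_append.2 (Or.inl h)
    · rw [hnames] at h
      rcases List.mem_append.1 h with h | h
      · exact List.mem_append.2 (Or.inr (by simp [pvNames, ho2]; exact Or.inr (by
          simpa [pvNames] using h)))
      · exact List.mem_append.2 (Or.inl (hU x h))
  set k1 := pvK graph o1 closed
  set k2 := pvK graph o2 closed
  have hpow : ∀ a b : Nat, a ≤ b → M ^ a ≤ M ^ b := fun a b h =>
    Nat.pow_le_pow_right (by omega) h
  have hsplit : pvPhi graph o1 closed =
      (rest.map (fun n => M ^ (2 * k1 + (if n.1 ∈ closed then 1 else 0)))).sum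
      + (kidnames.map (fun ch => M ^ (2 * k1 + (if ch ∈ closed then 1 else 0)))).sum := by
    simp only [pvPhi, ho1, List.map_append, List.sum_append, List.map_map, Function.comp_def]
    rfl
  have hsplit2 : pvPhi graph o2 closed =
      M ^ (2 * k2 + 1)
      + (rest.map (fun n => M ^ (2 * k2 + (if n.1 ∈ closed then 1 else 0)))).sum := by
    simp only [pvPhi, ho2, List.map_cons, List.sum_cons, if_pos hc]
    rfl
  have h1 : (rest.map (fun n => M ^ (2 * k1 + (if n.1 ∈ closed then 1 else 0)))).sum
      ≤ (rest.map (fun n => M ^ (2 * k2 + (if n.1 ∈ closed then 1 else 0)))).sum := by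
    apply List.sum_le_sum
    intro n _
    exact hpow _ _ (by omega)
  have h2 : (kidnames.map (fun ch => M ^ (2 * k1 + (if ch ∈ closed then 1 else 0)))).sum
      ≤ kidnames.length * M ^ (2 * k1) := by
    calc (kidnames.map (fun ch => M ^ (2 * k1 + (if ch ∈ closed then 1 else 0)))).sum
        ≤ (kidnames.map (fun _ => M ^ (2 * k1))).sum := by
          apply List.sum_le_sum
          intro ch hch
          simp [if_neg (hnc ch hch)]
      _ = kidnames.length * M ^ (2 * k1) := pv_sum_const _ _
  have h3 : kidnames.length * M ^ (2 * k1) < M ^ (2 * k2 + 1) := by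
    have e1 : kidnames.length * M ^ (2 * k1) ≤ (M - 2) * M ^ (2 * k1) :=
      Nat.mul_le_mul_right _ (by omega)
    have hpos : 0 < M ^ (2 * k1) := by positivity
    have e2 : (M - 2) * M ^ (2 * k1) < M * M ^ (2 * k1) :=
      Nat.mul_lt_mul_of_lt_of_le (by omega) le_rfl hpos
    have e3 : M * M ^ (2 * k1) ≤ M ^ (2 * k2 + 1) := by
      rw [← pow_succ']
      exact hpow _ _ (by omega)
    omega
  omega

lemma pvPhi_dec_not_mem (graph : List (String × List String)) (c : String) (anc : List String)
    (rest : List (String × List String)) (closed : List String) (kidnames : List String)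
    (hU : ∀ ch ∈ kidnames, ch ∈ pvU graph)
    (hlen : kidnames.length + 2 ≤ pvM graph)
    (hnc : ∀ ch ∈ kidnames, ch ∉ closed ++ [c])
    (hc : c ∉ closed) :
    pvPhi graph (rest ++ kidnames.map (fun ch => (ch, c :: anc))) (closed ++ [c])
      < pvPhi graph ((c, anc) :: rest) closed := by
  have hM := pvM_ge graph
  set M := pvM graph with hMdef
  set o2 := (c, anc) :: rest with ho2
  set o1 := rest ++ kidnames.map (fun ch => (ch, c :: anc)) with ho1
  set cl1 := closed ++ [c] with hcl1
  have hnames : pvNames o1 = pvNames rest ++ kidnames := by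
    simp [pvNames, ho1, Function.comp_def]
  have hsub : ∀ x, x ∈ pvU graph ++ pvNames o1 → x ∉ cl1 →
      x ∈ pvU graph ++ pvNames o2 ∧ x ∉ closed := by
    intro x hx hxc
    have hxcl : x ∉ closed := fun h => hxc (List.mem_append.2 (Or.inl h))
    refine ⟨?_, hxcl⟩
    rcases List.mem_append.1 hx with h | h
    · exact List.mem_append.2 (Or.inl h)
    · rw [hnames] at h
      rcases List.mem_append.1 h with h | h
      · exact List.mem_append.2 (Or.inr (by simp [pvNames, ho2]; exact Or.inr (by
          simpa [pvNames] using h)))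
      · exact List.mem_append.2 (Or.inl (hU x h))
  have hk : pvK graph o1 cl1 < pvK graph o2 closed := by
    apply pvK_lt graph o1 o2 cl1 closed hsub c
    · exact List.mem_append.2 (Or.inr (by simp [pvNames, ho2]))
    · exact hc
    · simp [hcl1]
  set k1 := pvK graph o1 cl1
  set k2 := pvK graph o2 closed
  have hpow : ∀ a b : Nat, a ≤ b → M ^ a ≤ M ^ b := fun a b h =>
    Nat.pow_le_pow_right (by omega) h
  have hsplit : pvPhi graph o1 cl1 =
      (rest.map (fun n => M ^ (2 * k1 + (if n.1 ∈ cl1 then 1 else 0)))).sum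
      + (kidnames.map (fun ch => M ^ (2 * k1 + (if ch ∈ cl1 then 1 else 0)))).sum := by
    simp only [pvPhi, ho1, List.map_append, List.sum_append, List.map_map, Function.comp_def]
    rfl
  have hsplit2 : pvPhi graph o2 closed =
      M ^ (2 * k2)
      + (rest.map (fun n => M ^ (2 * k2 + (if n.1 ∈ closed then 1 else 0)))).sum := by
    simp only [pvPhi, ho2, List.map_cons, List.sum_cons, if_neg hc, pow_zero]
    rfl
  have h1 : (rest.map (fun n => M ^ (2 * k1 + (if n.1 ∈ cl1 then 1 else 0)))).sum
      ≤ (rest.map (fun n => M ^ (2 * k2 + (if n.1 ∈ closed then 1 else 0)))).sum := by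
    apply List.sum_le_sum
    intro n _
    exact hpow _ _ (by split <;> split <;> omega)
  have h2 : (kidnames.map (fun ch => M ^ (2 * k1 + (if ch ∈ cl1 then 1 else 0)))).sum
      ≤ kidnames.length * M ^ (2 * k1) := by
    calc (kidnames.map (fun ch => M ^ (2 * k1 + (if ch ∈ cl1 then 1 else 0)))).sum
        ≤ (kidnames.map (fun _ => M ^ (2 * k1))).sum := by
          apply List.sum_le_sum
          intro ch hch
          simp [if_neg (hnc ch hch)]
      _ = kidnames.length * M ^ (2 * k1) := pv_sum_const _ _
  have h3 : kidnames.length * M ^ (2 * k1) < M ^ (2 * k2) := by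
    have e1 : kidnames.length * M ^ (2 * k1) ≤ (M - 2) * M ^ (2 * k1) :=
      Nat.mul_le_mul_right _ (by omega)
    have hpos : 0 < M ^ (2 * k1) := by positivity
    have e2 : (M - 2) * M ^ (2 * k1) < M * M ^ (2 * k1) :=
      Nat.mul_lt_mul_of_lt_of_le (by omega) le_rfl hpos
    have e3 : M * M ^ (2 * k1) ≤ M ^ (2 * k2) := by
      rw [← pow_succ']
      exact hpow _ _ (by omega)
    omega
  omega

-- A's main loop: pop the front node; on goal, reverse the parent chain; otherwise close
-- the name and append a fresh child node for every neighbour not in closed (duplicates kept).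
def pvLoopA (graph : List (String × List String)) (goal : String) :
    List (String × List String) → PySem.Set String → Option (List String)
  | [], _ => none
  | (name, anc) :: rest, closed =>
    if name = goal then
      some ((name :: anc).reverse)
    else
      let closed' := PySem.Set.add closed name
      pvLoopA graph goal
        (rest ++ ((pvGet graph name).filter
            (fun ch => !(PySem.Set.contains closed' ch))).map (fun ch => (ch, name :: anc)))
        closed'
termination_by open_ closed => pvPhi graph open_ closed
decreasing_by
  by_cases h : name ∈ closed
  · rw [PySem.Set.add_of_mem h]
    apply pvPhi_dec_mem
    · intro ch hch
      exact pvGet_subset_U graph name ch (List.mem_filter.1 hch).1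
    · exact le_trans (Nat.add_le_add_right (List.length_filter_le _ _) 2) (pvGet_len_le graph name)
    · intro ch hch
      have hb := (List.mem_filter.1 hch).2
      simp only [Bool.not_eq_true'] at hb
      exact mt (PySem.Set.contains_iff _ ch).mpr (by rw [hb]; simp)
    · exact h
  · rw [PySem.Set.add_of_not_mem h]
    apply pvPhi_dec_not_mem
    · intro ch hch
      exact pvGet_subset_U graph name ch (List.mem_filter.1 hch).1
    · exact le_trans (Nat.add_le_add_right (List.length_filter_le _ _) 2) (pvGet_len_le graph name)
    · intro ch hch
      have hb := (List.mem_filter.1 hch).2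
      simp only [Bool.not_eq_true'] at hb
      exact mt (PySem.Set.contains_iff _ ch).mpr (by rw [hb]; simp)
    · exact h

def ao_star (start_name : String) (goal_name : String) (graph : List (String × List String))
    (heuristics : List (String × Int)) : Option (List String) :=
  -- heuristics.get(start_name, float('inf')) is stored on the node but never read by A.
  pvLoopA graph goal_name [(start_name, [])] PySem.Set.empty

-- ===== PORT B =====
-- next(u for u in layer if path[-1] in graph.get(u, [])): first layer node adjacent to x.
-- Python's next() would raise StopIteration on no hit; that branch is unreachable in B's
-- runs (every non-start layer node has a discoverer in the previous layer).
def pvFirstAdj (graph : List (String × List String)) (x : String) (layer : List String) :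
    String :=
  match layer.find? (fun u => (pvGet graph u).contains x) with
  | some u => u
  | none => ""

-- the reconstruction loop 'for layer in reversed(layers[:-1]): path.append(next(...))';
-- the path is carried reversed (head = most recently appended), so the final pathRev
-- is already path[::-1].
def pvBuildC (graph : List (String × List String)) :
    List (List String) → List String → List String
  | [], pathRev => pathRev
  | layer :: rest, pathRev =>
      pvBuildC graph rest (pvFirstAdj graph (pathRev.headD "") layer :: pathRev)

-- the two nested for-loops growing one frontier from the current layer
def pvExpand (graph : List (String × List String)) (layer : List String)
    (st : PySem.Set String × List String) : PySem.Set String × List String :=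
  layer.foldl (fun sf u =>
    (pvGet graph u).foldl (fun sf v =>
      if PySem.Set.contains sf.1 v then sf
      else (PySem.Set.add sf.1 v, sf.2 ++ [v])) sf) st

-- termination measure for B's while-loop: number of graph-listed names not yet seen
def pvCountC (graph : List (String × List String)) (seen : PySem.Set String) : Nat :=
  ((pvU graph).toFinset.filter (fun x => x ∉ seen)).card

lemma pvCountC_le (graph : List (String × List String)) (s s' : PySem.Set String)
    (h : ∀ x, x ∈ s → x ∈ s') : pvCountC graph s' ≤ pvCountC graph s := by
  apply Finset.card_le_card
  intro x hx
  simp only [Finset.mem_filter, List.mem_toFinset] at hx ⊢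
  exact ⟨hx.1, fun hm => hx.2 (h x hm)⟩

lemma pvCountC_lt (graph : List (String × List String)) (s s' : PySem.Set String)
    (h : ∀ x, x ∈ s → x ∈ s')
    (w : String) (hwU : w ∈ pvU graph) (hw : w ∉ s) (hw' : w ∈ s') :
    pvCountC graph s' < pvCountC graph s := by
  apply Finset.card_lt_card
  rw [Finset.ssubset_iff_of_subset]
  · refine ⟨w, ?_, ?_⟩
    · simp only [Finset.mem_filter, List.mem_toFinset]
      exact ⟨hwU, hw⟩
    · simp only [Finset.mem_filter, List.mem_toFinset, not_and, not_not]
      exact fun _ => hw'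
  · intro x hx
    simp only [Finset.mem_filter, List.mem_toFinset] at hx ⊢
    exact ⟨hx.1, fun hm => hx.2 (h x hm)⟩

lemma pvExpandInner_term (graph : List (String × List String)) :
    ∀ (cs : List String) (s : PySem.Set String) (q : List String),
      (∀ x ∈ cs, x ∈ pvU graph) →
      (∀ x, x ∈ s → x ∈ (cs.foldl (fun sf v =>
          if PySem.Set.contains sf.1 v then sf
          else (PySem.Set.add sf.1 v, sf.2 ++ [v])) (s, q)).1) ∧
      ((cs.foldl (fun sf v =>
          if PySem.Set.contains sf.1 v then sf
          else (PySem.Set.add sf.1 v, sf.2 ++ [v])) (s, q)).2 = q ∨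
        pvCountC graph (cs.foldl (fun sf v =>
          if PySem.Set.contains sf.1 v then sf
          else (PySem.Set.add sf.1 v, sf.2 ++ [v])) (s, q)).1 < pvCountC graph s) := by
  intro cs
  induction cs with
  | nil => intro s q _; exact ⟨fun x h => h, Or.inl rfl⟩
  | cons v cs ih =>
    intro s q hcs
    simp only [List.foldl_cons]
    by_cases hv : PySem.Set.contains s v
    · rw [if_pos hv]
      exact ih s q (fun x hx => hcs x (List.mem_cons_of_mem _ hx))
    · rw [if_neg hv]
      have hvs : v ∉ s := fun h => hv ((PySem.Set.contains_iff s v).mpr h)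
      rw [PySem.Set.add_of_not_mem hvs]
      have hmono : ∀ x, x ∈ s → x ∈ s ++ [v] := fun x hx => List.mem_append.2 (Or.inl hx)
      obtain ⟨ih1, ih2⟩ := ih (s ++ [v]) (q ++ [v])
        (fun x hx => hcs x (List.mem_cons_of_mem _ hx))
      have hlt : pvCountC graph (s ++ [v]) < pvCountC graph s :=
        pvCountC_lt graph s _ hmono v (hcs v (List.mem_cons_self ..)) hvs (by simp)
      refine ⟨fun x hx => ih1 x (hmono x hx), Or.inr ?_⟩
      have hle : pvCountC graph (List.foldl (fun sf v =>
          if PySem.Set.contains sf.1 v then sf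
          else (PySem.Set.add sf.1 v, sf.2 ++ [v])) (s ++ [v], q ++ [v]) cs).1
          ≤ pvCountC graph (s ++ [v]) := pvCountC_le graph _ _ ih1
      omega

lemma pvExpand_term (graph : List (String × List String)) :
    ∀ (layer : List String) (s : PySem.Set String) (q : List String),
      (∀ x, x ∈ s → x ∈ (pvExpand graph layer (s, q)).1) ∧
      ((pvExpand graph layer (s, q)).2 = q ∨
        pvCountC graph (pvExpand graph layer (s, q)).1 < pvCountC graph s) := by
  intro layer
  induction layer with
  | nil => intro s q; exact ⟨fun x h => h, Or.inl rfl⟩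
  | cons u layer ih =>
    intro s q
    obtain ⟨i1, i2⟩ := pvExpandInner_term graph (pvGet graph u) s q
      (fun x hx => pvGet_subset_U graph u x hx)
    obtain ⟨s1, q1, hst⟩ : ∃ s1 q1, (pvGet graph u).foldl (fun sf v =>
        if PySem.Set.contains sf.1 v then sf
        else (PySem.Set.add sf.1 v, sf.2 ++ [v])) (s, q) = (s1, q1) := ⟨_, _, rfl⟩
    have hunf : pvExpand graph (u :: layer) (s, q) = pvExpand graph layer (s1, q1) := by
      simp only [pvExpand, List.foldl_cons, hst]
    simp only [hst] at i1 i2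
    obtain ⟨hm, ha⟩ := ih s1 q1
    rw [hunf]
    have hle1 : pvCountC graph s1 ≤ pvCountC graph s := pvCountC_le graph _ _ i1
    have hle2 : pvCountC graph (pvExpand graph layer (s1, q1)).1 ≤ pvCountC graph s1 :=
      pvCountC_le graph _ _ hm
    refine ⟨fun x hx => hm x (i1 x hx), ?_⟩
    rcases i2 with i2 | i2
    · rcases ha with ha | ha
      · exact Or.inl (ha.trans i2)
      · exact Or.inr (by omega)
    · exact Or.inr (by omega)

-- B's while-loop: layer = layers[-1], earlier = layers[:-1] newest first, seen as in Source B
def pvLoopC (graph : List (String × List String)) (goal : String)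
    (layer : List String) (earlier : List (List String)) (seen : PySem.Set String) :
    Option (List String) :=
  if layer.contains goal then
    some (pvBuildC graph earlier [goal])
  else
    let sf := pvExpand graph layer (seen, [])
    if sf.2 = [] then none
    else pvLoopC graph goal sf.2 (layer :: earlier) sf.1
termination_by pvCountC graph seen
decreasing_by
  rcases (pvExpand_term graph layer seen []).2 with h | h
  · exact absurd h (by assumption)
  · exact h

def ao_star_alt (start_name : String) (goal_name : String)
    (graph : List (String × List String)) (heuristics : List (String × Int)) :
    Option (List String) :=
  -- layers = [[start_name]]; seen = {start_name}
  pvLoopC graph goal_name [start_name] [] (PySem.Set.ofList [start_name])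

-- ===== PRECONDITION & SPEC =====
def Spec_ao_star (start_name : String) (goal_name : String) (graph : List (String × List String)) (heuristics : List (String × Int)) (out : Option (List String)) : Prop :=
  out = ao_star_alt start_name goal_name graph heuristics
instance (start_name : String) (goal_name : String) (graph : List (String × List String)) (heuristics : List (String × Int)) (out : Option (List String)) : Decidable (Spec_ao_star start_name goal_name graph heuristics out) := by
  unfold Spec_ao_star; infer_instance

-- ===== CLAIM =====
def Claim_equal_ao_star : Prop := ∀ (start_name : String) (goal_name : String) (graph : List (String × List String)) (heuristics : List (String × Int)), Dom_ao_star start_name goal_name graph heuristics → Spec_ao_star start_name goal_name graph heuristics (ao_star start_name goal_name graph heuristics)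

-- ===== LEMMAS AND PROOFS =====

-- Proof-side bridge: a name-based BFS with a parent dictionary (queue of names, parent
-- assigned at first discovery).  pv_main proves A equals this bridge; the pvLayerRun /
-- pv_mainC lemmas prove the bridge equals B's layered loop.
lemma pvPhi_pos (graph : List (String × List String)) (n : String × List String)
    (rest : List (String × List String)) (closed : List String) :
    1 ≤ pvPhi graph (n :: rest) closed := by
  have h2 := pvM_ge graph
  have : 0 < pvM graph ^ (2 * pvK graph (n :: rest) closed + (if n.1 ∈ closed then 1 else 0)) := by
    positivity
  simp only [pvPhi, List.map_cons, List.sum_cons]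
  omega

-- path reconstruction by parent pointers: while node is not None: append; follow parent.
def pvWalk (parent : PySem.Dict String (Option String)) : Nat → Option String → List String
  | _, none => []
  | 0, some _ => []
  | f + 1, some n => n :: pvWalk parent f (PySem.Dict.getD parent n none)

-- the bridge's per-node discovery fold, threading (parent, queue)
def pvStepB (graph : List (String × List String)) (name : String)
    (st : PySem.Dict String (Option String) × List String) :
    PySem.Dict String (Option String) × List String :=
  (pvGet graph name).foldl
    (fun pq ch =>
      if PySem.Dict.contains pq.1 ch then pq
      else (PySem.Dict.insert pq.1 ch (some name), pq.2 ++ [ch]))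
    st

def pvCountB (graph : List (String × List String))
    (parent : PySem.Dict String (Option String)) : Nat :=
  ((pvU graph).toFinset.filter (fun x => ¬ PySem.Dict.contains parent x)).card

lemma pvCountB_le (graph : List (String × List String))
    (p p' : PySem.Dict String (Option String))
    (h : ∀ x, PySem.Dict.contains p x = true → PySem.Dict.contains p' x = true) :
    pvCountB graph p' ≤ pvCountB graph p := by
  apply Finset.card_le_card
  intro x hx
  simp only [Finset.mem_filter, List.mem_toFinset] at hx ⊢
  exact ⟨hx.1, fun hcx => hx.2 (h x hcx)⟩

lemma pvCountB_lt (graph : List (String × List String))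
    (p p' : PySem.Dict String (Option String))
    (h : ∀ x, PySem.Dict.contains p x = true → PySem.Dict.contains p' x = true)
    (w : String) (hwU : w ∈ pvU graph) (hw : PySem.Dict.contains p w = false)
    (hw' : PySem.Dict.contains p' w = true) :
    pvCountB graph p' < pvCountB graph p := by
  apply Finset.card_lt_card
  rw [Finset.ssubset_iff_of_subset]
  · refine ⟨w, ?_, ?_⟩
    · simp only [Finset.mem_filter, List.mem_toFinset]
      exact ⟨hwU, by simp [hw]⟩
    · simp only [Finset.mem_filter, List.mem_toFinset, not_and]
      intro _ hc
      exact hc hw'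
  · intro x hx
    simp only [Finset.mem_filter, List.mem_toFinset] at hx ⊢
    exact ⟨hx.1, fun hcx => hx.2 (h x hcx)⟩

lemma pvStepB_term (graph : List (String × List String)) (name : String) :
    ∀ (cs : List String) (p : PySem.Dict String (Option String)) (q : List String),
      (∀ x ∈ cs, x ∈ pvU graph) →
      (∀ x, PySem.Dict.contains p x = true →
        PySem.Dict.contains (cs.foldl (fun pq ch =>
          if PySem.Dict.contains pq.1 ch then pq
          else (PySem.Dict.insert pq.1 ch (some name), pq.2 ++ [ch])) (p, q)).1 x = true) ∧
      ((cs.foldl (fun pq ch =>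
          if PySem.Dict.contains pq.1 ch then pq
          else (PySem.Dict.insert pq.1 ch (some name), pq.2 ++ [ch])) (p, q)).2 = q ∨
        pvCountB graph (cs.foldl (fun pq ch =>
          if PySem.Dict.contains pq.1 ch then pq
          else (PySem.Dict.insert pq.1 ch (some name), pq.2 ++ [ch])) (p, q)).1 < pvCountB graph p) := by
  intro cs
  induction cs with
  | nil => intro p q _; exact ⟨fun x h => h, Or.inl rfl⟩
  | cons ch cs ih =>
    intro p q hcs
    simp only [List.foldl_cons]
    by_cases hc : PySem.Dict.contains p ch
    · rw [if_pos hc]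
      exact ih p q (fun x hx => hcs x (List.mem_cons_of_mem _ hx))
    · rw [if_neg hc]
      have hmono : ∀ x, PySem.Dict.contains p x = true →
          PySem.Dict.contains (PySem.Dict.insert p ch (some name)) x = true := by
        intro x hx
        rw [PySem.Dict.contains_insert]
        simp [hx]
      have hich : PySem.Dict.contains (PySem.Dict.insert p ch (some name)) ch = true :=
        PySem.Dict.contains_insert_self _ _ _
      have hlt : pvCountB graph (PySem.Dict.insert p ch (some name)) < pvCountB graph p :=
        pvCountB_lt graph p _ hmono ch (hcs ch (List.mem_cons_self ..))
          (by simpa using hc) hich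
      obtain ⟨ih1, ih2⟩ := ih (PySem.Dict.insert p ch (some name)) (q ++ [ch])
        (fun x hx => hcs x (List.mem_cons_of_mem _ hx))
      refine ⟨fun x hx => ih1 x (hmono x hx), Or.inr ?_⟩
      have hle : pvCountB graph (List.foldl (fun pq ch =>
          if pq.1.contains ch = true then pq
          else (pq.1.insert ch (some name), pq.2 ++ [ch])) (p.insert ch (some name), q ++ [ch]) cs).1
          ≤ pvCountB graph (p.insert ch (some name)) := pvCountB_le graph _ _ ih1
      omega

def pvLoopB (graph : List (String × List String)) (goal : String)
    (parent : PySem.Dict String (Option String)) (queue : List String) : Option (List String) :=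
  match queue with
  | [] => none
  | name :: rest =>
    if name = goal then
      some ((pvWalk parent (PySem.Dict.size parent + 1) (some name)).reverse)
    else
      let pq := pvStepB graph name (parent, rest)
      pvLoopB graph goal pq.1 pq.2
termination_by (pvCountB graph parent, queue.length)
decreasing_by
  simp only [pvStepB]
  have h := pvStepB_term graph name (pvGet graph name) parent rest
    (fun x hx => pvGet_subset_U graph name x hx)
  have hle := pvCountB_le graph _ _ h.1
  rcases h.2 with h2 | h2
  · rcases Nat.eq_or_lt_of_le hle with heq | hlt
    · rw [heq, h2]
      exact Prod.Lex.right _ (by simp)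
    · exact Prod.Lex.left _ _ hlt
  · exact Prod.Lex.left _ _ h2

-- keep-first dedup relative to a 'seen' set: models A's open-list first copies
def pvDsd (seen : List String) : List String → List String
  | [] => []
  | x :: xs => if x ∈ seen then pvDsd seen xs else x :: pvDsd (x :: seen) xs

lemma pvDsd_congr (s1 s2 : List String) (l : List String) (h : ∀ x, x ∈ s1 ↔ x ∈ s2) :
    pvDsd s1 l = pvDsd s2 l := by
  induction l generalizing s1 s2 with
  | nil => rfl
  | cons x xs ih =>
    simp only [pvDsd]
    by_cases hx : x ∈ s1
    · rw [if_pos hx, if_pos ((h x).1 hx)]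
      exact ih s1 s2 h
    · rw [if_neg hx, if_neg (fun hx2 => hx ((h x).2 hx2))]
      refine congrArg _ (ih _ _ ?_)
      intro y
      simp only [List.mem_cons]
      exact or_congr Iff.rfl (h y)

lemma pvDsd_append (s l1 l2 : List String) :
    pvDsd s (l1 ++ l2) = pvDsd s l1 ++ pvDsd (l1 ++ s) l2 := by
  induction l1 generalizing s with
  | nil => simp [pvDsd]
  | cons x l1 ih =>
    simp only [List.cons_append, pvDsd]
    by_cases hx : x ∈ s
    · rw [if_pos hx, if_pos hx, ih s]
      refine congrArg _ (pvDsd_congr _ _ _ ?_)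
      intro y
      simp only [List.mem_append, List.mem_cons]
      constructor
      · rintro (h | h)
        · exact Or.inr (Or.inl h)
        · exact Or.inr (Or.inr h)
      · rintro (rfl | h | h)
        · exact Or.inr hx
        · exact Or.inl h
        · exact Or.inr h
    · rw [if_neg hx, if_neg hx, ih (x :: s), List.cons_append]
      refine congrArg _ (congrArg _ (pvDsd_congr _ _ _ ?_))
      intro y
      simp only [List.mem_append, List.mem_cons]
      tauto

lemma pvDsd_nil_of_sub (s l : List String) (h : ∀ x ∈ l, x ∈ s) : pvDsd s l = [] := by
  induction l with
  | nil => rfl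
  | cons x xs ih =>
    simp only [pvDsd, if_pos (h x (List.mem_cons_self ..))]
    exact ih (fun y hy => h y (List.mem_cons_of_mem _ hy))

lemma pvDsd_filter (s l : List String) (p : String → Bool) (h : ∀ x, p x = false → x ∈ s) :
    pvDsd s (l.filter p) = pvDsd s l := by
  induction l generalizing s with
  | nil => rfl
  | cons x xs ih =>
    by_cases hp : p x
    · rw [List.filter_cons_of_pos hp]
      simp only [pvDsd]
      by_cases hx : x ∈ s
      · rw [if_pos hx, if_pos hx, ih s h]
      · rw [if_neg hx, if_neg hx, ih (x :: s) (fun y hy => List.mem_cons_of_mem _ (h y hy))]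
    · rw [List.filter_cons_of_neg hp]
      simp only [pvDsd, if_pos (h x (by simpa using hp))]
      exact ih s h

lemma pvWalk_congr (p p' : PySem.Dict String (Option String)) :
    ∀ (f : Nat) (c : String) (L : List String), pvWalk p f (some c) = L →
      (∀ y ∈ L, PySem.Dict.contains p y = true) →
      (∀ y, PySem.Dict.contains p y = true →
        PySem.Dict.getD p' y none = PySem.Dict.getD p y none) →
      pvWalk p' f (some c) = L := by
  intro f
  induction f with
  | zero =>
    intro c L hL _ _
    exact hL
  | succ f ih =>
    intro c L hL hmem hpres
    simp only [pvWalk] at hL ⊢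
    have hc : PySem.Dict.contains p c = true := hmem c (hL ▸ List.mem_cons_self ..)
    rw [hpres c hc]
    cases hv : PySem.Dict.getD p c none with
    | none =>
      rw [hv] at hL
      simpa [pvWalk] using hL
    | some c2 =>
      rw [hv] at hL
      cases L with
      | nil => exact absurd hL (by simp)
      | cons z L' =>
        injection hL with h1 h2
        subst h1
        exact congrArg _ (ih c2 L' h2 (fun y hy => hmem y (List.mem_cons_of_mem _ hy)) hpres)

-- first-copy chain invariant: every unshadowed, unclosed open node's ancestor chain is
-- exactly the pvWalk of its name in the bridge's parent dict
def pvChains (closed : List String) (parent : PySem.Dict String (Option String)) :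
    List (String × List String) → List String → Prop
  | [], _ => True
  | (c, anc) :: rest, shadow =>
      (c ∉ shadow → c ∉ closed →
        ((c :: anc).Nodup ∧ (∀ a ∈ anc, a ∈ closed) ∧
          ∀ f : Nat, (c :: anc).length ≤ f → pvWalk parent f (some c) = c :: anc)) ∧
      pvChains closed parent rest (c :: shadow)

lemma pvChains_shadow (closed : List String) (parent : PySem.Dict String (Option String)) :
    ∀ (l : List (String × List String)) (s1 s2 : List String),
      (∀ x ∈ s1, x ∈ s2 ∨ x ∈ closed) →
      pvChains closed parent l s1 → pvChains closed parent l s2 := by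
  intro l
  induction l with
  | nil => intro s1 s2 _ _; trivial
  | cons n rest ih =>
    obtain ⟨c, anc⟩ := n
    intro s1 s2 hs h
    obtain ⟨hob, hrest⟩ := h
    refine ⟨?_, ih (c :: s1) (c :: s2) ?_ hrest⟩
    · intro hc2 hcc
      refine hob ?_ hcc
      intro hc1
      rcases hs c hc1 with h | h
      · exact hc2 h
      · exact hcc h
    · intro x hx
      rcases List.mem_cons.1 hx with rfl | hx
      · exact Or.inl (List.mem_cons_self ..)
      · rcases hs x hx with h | h
        · exact Or.inl (List.mem_cons_of_mem _ h)
        · exact Or.inr h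

lemma pvChains_append (closed : List String) (parent : PySem.Dict String (Option String)) :
    ∀ (l1 l2 : List (String × List String)) (s : List String),
      pvChains closed parent l1 s →
      pvChains closed parent l2 (pvNames l1 ++ s) →
      pvChains closed parent (l1 ++ l2) s := by
  intro l1
  induction l1 with
  | nil => intro l2 s _ h2; simpa [pvNames] using h2
  | cons n l1 ih =>
    obtain ⟨c, anc⟩ := n
    intro l2 s h1 h2
    obtain ⟨hob, h1'⟩ := h1
    refine ⟨hob, ih l2 (c :: s) h1' ?_⟩
    refine pvChains_shadow closed parent l2 _ _ ?_ h2
    intro x hx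
    simp only [pvNames, List.map_cons, List.cons_append, List.mem_cons, List.mem_append] at hx
    left
    simp only [List.mem_append, List.mem_cons, pvNames]
    tauto

lemma pvChains_of_shadowed (closed : List String) (parent : PySem.Dict String (Option String)) :
    ∀ (l : List (String × List String)) (s : List String),
      (∀ pr ∈ l, pr.1 ∈ s ∨ pr.1 ∈ closed) →
      pvChains closed parent l s := by
  intro l
  induction l with
  | nil => intro s _; trivial
  | cons n rest ih =>
    obtain ⟨c, anc⟩ := n
    intro s h
    refine ⟨?_, ih (c :: s) ?_⟩
    · intro hcs hcc
      rcases h (c, anc) (List.mem_cons_self ..) with hh | hh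
      · exact absurd hh hcs
      · exact absurd hh hcc
    · intro pr hpr
      rcases h pr (List.mem_cons_of_mem _ hpr) with hh | hh
      · exact Or.inl (List.mem_cons_of_mem _ hh)
      · exact Or.inr hh

lemma pvChains_update (closed closed' : List String)
    (parent parent' : PySem.Dict String (Option String)) :
    ∀ (l : List (String × List String)) (s s' : List String),
      (∀ x ∈ s, x ∈ s' ∨ x ∈ closed') →
      (∀ x ∈ closed, x ∈ closed') →
      (∀ c anc, (c, anc) ∈ l → c ∉ closed' → (∀ a ∈ anc, a ∈ closed) →
        (∀ f : Nat, (c :: anc).length ≤ f → pvWalk parent f (some c) = c :: anc) →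
        (∀ f : Nat, (c :: anc).length ≤ f → pvWalk parent' f (some c) = c :: anc)) →
      pvChains closed parent l s → pvChains closed' parent' l s' := by
  intro l
  induction l with
  | nil => intro s s' _ _ _ _; trivial
  | cons n rest ih =>
    obtain ⟨c, anc⟩ := n
    intro s s' hs hcl hw h
    obtain ⟨hob, hrest⟩ := h
    refine ⟨?_, ih (c :: s) (c :: s') ?_ hcl
      (fun c2 anc2 hm => hw c2 anc2 (List.mem_cons_of_mem _ hm)) hrest⟩
    · intro hcs' hcc'
      have hcs : c ∉ s := by
        intro hmem
        rcases hs c hmem with h | h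
        · exact hcs' h
        · exact hcc' h
      have hcc : c ∉ closed := fun hmem => hcc' (hcl c hmem)
      obtain ⟨hnd, hanc, hwalk⟩ := hob hcs hcc
      exact ⟨hnd, fun a ha => hcl a (hanc a ha),
        hw c anc (List.mem_cons_self ..) hcc' hanc hwalk⟩
    · intro x hx
      rcases List.mem_cons.1 hx with rfl | hx
      · exact Or.inl (List.mem_cons_self ..)
      · rcases hs x hx with h | h
        · exact Or.inl (List.mem_cons_of_mem _ h)
        · exact Or.inr h

lemma pvChains_kids (closed' : List String) (p' : PySem.Dict String (Option String))
    (c : String) (anc : List String)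
    (hwc : ∀ f : Nat, (c :: anc).length ≤ f → pvWalk p' f (some c) = c :: anc)
    (hnd : (c :: anc).Nodup) (hcc' : c ∈ closed') (hanc' : ∀ a ∈ anc, a ∈ closed') :
    ∀ (kn : List String) (s : List String),
      (∀ ch ∈ kn, ch ∉ s → ch ∉ closed' → PySem.Dict.getD p' ch none = some c) →
      pvChains closed' p' (kn.map (fun ch => (ch, c :: anc))) s := by
  intro kn
  induction kn with
  | nil => intro s _; trivial
  | cons ch kn ih =>
    intro s hget
    refine ⟨?_, ih (ch :: s)
      (fun x hx hxs hxc => hget x (List.mem_cons_of_mem _ hx)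
        (fun hmem => hxs (List.mem_cons_of_mem _ hmem)) hxc)⟩
    intro hchs hchc
    have hchne : ch ∉ c :: anc := by
      intro hmem
      rcases List.mem_cons.1 hmem with rfl | hmem
      · exact hchc hcc'
      · exact hchc (hanc' ch hmem)
    refine ⟨List.nodup_cons.2 ⟨hchne, hnd⟩, ?_, ?_⟩
    · intro a ha
      rcases List.mem_cons.1 ha with rfl | ha
      · exact hcc'
      · exact hanc' a ha
    · intro f hf
      match f, hf with
      | f + 1, hf =>
        simp only [pvWalk]
        rw [hget ch (List.mem_cons_self ..) hchs hchc]
        exact congrArg _ (hwc f (by simpa using Nat.le_of_succ_le_succ hf))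

lemma pvStepB_spec (graph : List (String × List String)) (name : String) :
    ∀ (cs : List String) (p : PySem.Dict String (Option String)) (q S : List String),
      (∀ x, PySem.Dict.contains p x = true ↔ x ∈ S) →
      (PySem.Dict.keys p).Nodup →
      (∀ x, PySem.Dict.contains (cs.foldl (fun pq ch =>
          if PySem.Dict.contains pq.1 ch then pq
          else (PySem.Dict.insert pq.1 ch (some name), pq.2 ++ [ch])) (p, q)).1 x = true
        ↔ x ∈ S ∨ x ∈ cs) ∧
      ((cs.foldl (fun pq ch =>
          if PySem.Dict.contains pq.1 ch then pq
          else (PySem.Dict.insert pq.1 ch (some name), pq.2 ++ [ch])) (p, q)).2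
        = q ++ pvDsd S cs) ∧
      (∀ x, PySem.Dict.contains p x = true →
        PySem.Dict.get? (cs.foldl (fun pq ch =>
          if PySem.Dict.contains pq.1 ch then pq
          else (PySem.Dict.insert pq.1 ch (some name), pq.2 ++ [ch])) (p, q)).1 x
          = PySem.Dict.get? p x) ∧
      (∀ x, x ∈ cs → x ∉ S →
        PySem.Dict.get? (cs.foldl (fun pq ch =>
          if PySem.Dict.contains pq.1 ch then pq
          else (PySem.Dict.insert pq.1 ch (some name), pq.2 ++ [ch])) (p, q)).1 x
          = some (some name)) ∧
      (PySem.Dict.keys (cs.foldl (fun pq ch =>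
          if PySem.Dict.contains pq.1 ch then pq
          else (PySem.Dict.insert pq.1 ch (some name), pq.2 ++ [ch])) (p, q)).1).Nodup := by
  intro cs
  induction cs with
  | nil =>
    intro p q S hS hnd
    refine ⟨fun x => by simpa using hS x, by simp [pvDsd], fun x _ => rfl, by simp, hnd⟩
  | cons ch cs ih =>
    intro p q S hS hnd
    simp only [List.foldl_cons]
    by_cases hc : PySem.Dict.contains p ch
    · rw [if_pos hc]
      obtain ⟨i1, i2, i3, i4, i5⟩ := ih p q S hS hnd
      have hchS : ch ∈ S := (hS ch).1 hc
      refine ⟨?_, ?_, i3, ?_, i5⟩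
      · intro x
        rw [i1 x]
        simp only [List.mem_cons]
        constructor
        · rintro (h | h)
          · exact Or.inl h
          · exact Or.inr (Or.inr h)
        · rintro (h | rfl | h)
          · exact Or.inl h
          · exact Or.inl hchS
          · exact Or.inr h
      · rw [i2]
        simp only [pvDsd, if_pos hchS]
      · intro x hx hxS
        rcases List.mem_cons.1 hx with rfl | hx
        · exact absurd hchS hxS
        · exact i4 x hx hxS
    · rw [if_neg hc]
      have hchS : ch ∉ S := fun h => hc ((hS ch).2 h)
      have hS1 : ∀ x, PySem.Dict.contains (PySem.Dict.insert p ch (some name)) x = true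
          ↔ x ∈ ch :: S := by
        intro x
        rw [PySem.Dict.contains_insert]
        simp only [List.mem_cons, Bool.or_eq_true, beq_iff_eq]
        exact or_congr Iff.rfl (hS x)
      have hnd1 : (PySem.Dict.keys (PySem.Dict.insert p ch (some name))).Nodup :=
        PySem.Dict.nodup_keys_insert p ch (some name) hnd
      obtain ⟨i1, i2, i3, i4, i5⟩ := ih (PySem.Dict.insert p ch (some name)) (q ++ [ch]) (ch :: S) hS1 hnd1
      refine ⟨?_, ?_, ?_, ?_, i5⟩
      · intro x
        rw [i1 x]
        simp only [List.mem_cons]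
        tauto
      · rw [i2]
        simp only [pvDsd, if_neg hchS, List.append_assoc, List.singleton_append]
      · intro x hx
        have hxne : x ≠ ch := fun h => hc (h ▸ hx)
        rw [i3 x (by rw [hS1]; exact List.mem_cons_of_mem _ ((hS x).1 hx))]
        exact PySem.Dict.get?_insert_of_ne _ _ hxne
      · intro x hx hxS
        rcases eq_or_ne x ch with rfl | hxne
        · rw [i3 x (by rw [hS1]; exact List.mem_cons_self ..)]
          exact PySem.Dict.get?_insert_self ..
        · rcases List.mem_cons.1 hx with rfl | hx
          · exact absurd rfl hxne
          · exact i4 x hx (by simp only [List.mem_cons]; rintro (h | h); exact hxne h; exact hxS h)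

lemma pvNames_append_kids (rest : List (String × List String)) (kn : List String)
    (pr : List String) :
    pvNames (rest ++ kn.map (fun ch => (ch, pr))) = pvNames rest ++ kn := by
  simp [pvNames, Function.comp_def]

lemma pv_main (graph : List (String × List String)) (goal : String) :
    ∀ (N : Nat) (open_ : List (String × List String)) (closed : List String)
      (parent : PySem.Dict String (Option String)) (queue : List String),
      pvPhi graph open_ closed ≤ N →
      queue = pvDsd closed (pvNames open_) →
      (∀ x, PySem.Dict.contains parent x = true ↔ x ∈ closed ∨ x ∈ pvNames open_) →
      (∀ x ∈ closed, ∀ ch ∈ pvGet graph x, ch ∉ closed → ch ∈ pvNames open_) →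
      goal ∉ closed →
      (PySem.Dict.keys parent).Nodup →
      pvChains closed parent open_ [] →
      pvLoopA graph goal open_ closed = pvLoopB graph goal parent queue := by
  intro N
  induction N with
  | zero =>
    intro open_ closed parent queue hN h1 h2 h3 h4 h5 h6
    cases open_ with
    | nil =>
      subst h1
      simp [pvLoopA, pvLoopB, pvDsd, pvNames]
    | cons n rest =>
      exact absurd hN (by have := pvPhi_pos graph n rest closed; omega)
  | succ N ih =>
    intro open_ closed parent queue hN h1 h2 h3 h4 h5 h6
    cases open_ with
    | nil =>
      subst h1
      simp [pvLoopA, pvLoopB, pvDsd, pvNames]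
    | cons n rest =>
      obtain ⟨c, anc⟩ := n
      have hnames : pvNames ((c, anc) :: rest) = c :: pvNames rest := by simp [pvNames]
      obtain ⟨hob, hchrest⟩ := h6
      by_cases hcg : c = goal
      · -- goal popped: both sides return the reversed chain
        subst hcg
        obtain ⟨hnd, hanc, hw⟩ := hob (by simp) h4
        rw [hnames] at h1
        simp only [pvDsd, if_neg h4] at h1
        have hsub : ∀ y ∈ c :: anc, y ∈ PySem.Dict.keys parent := by
          intro y hy
          have hcy : PySem.Dict.contains parent y = true := by
            rw [h2 y]
            rcases List.mem_cons.1 hy with rfl | hy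
            · exact Or.inr (by rw [hnames]; exact List.mem_cons_self ..)
            · exact Or.inl (hanc y hy)
          rwa [PySem.Dict.contains_iff_mem_keys] at hcy
        have hlen : (c :: anc).length ≤ PySem.Dict.size parent + 1 := by
          have e1 := List.toFinset_card_of_nodup hnd
          have e2 : (c :: anc).toFinset ⊆ (PySem.Dict.keys parent).toFinset := by
            intro y hy
            rw [List.mem_toFinset] at hy ⊢
            exact hsub y hy
          have e3 := Finset.card_le_card e2
          have e4 := List.toFinset_card_le (PySem.Dict.keys parent)
          have e5 : (PySem.Dict.keys parent).length = PySem.Dict.size parent := by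
            simp [PySem.Dict.keys, PySem.Dict.size]
          omega
        rw [h1, pvLoopA, pvLoopB]
        simp [hw _ (by omega)]
      · by_cases hcl : c ∈ closed
        · -- duplicate pop: A re-expands a closed name, the bridge's state is untouched
          have hadd : PySem.Set.add closed c = closed := PySem.Set.add_of_mem hcl
          have hkid : ∀ ch ∈ (pvGet graph c).filter (fun ch => !(PySem.Set.contains closed ch)),
              ch ∈ pvNames rest ∧ ch ∉ closed := by
            intro ch hch
            obtain ⟨hg, hb⟩ := List.mem_filter.1 hch
            have hnc : ch ∉ closed :=
              mt (PySem.Set.contains_iff _ ch).mpr (by rw [Bool.not_eq_true'] at hb; rw [hb]; simp)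
            have hmo := h3 c hcl ch hg hnc
            rw [hnames] at hmo
            rcases List.mem_cons.1 hmo with rfl | h
            · exact absurd hcl hnc
            · exact ⟨h, hnc⟩
          rw [pvLoopA]
          simp only [if_neg hcg, hadd]
          rw [h1, hnames]
          simp only [pvDsd, if_pos hcl]
          refine ih _ closed parent _ ?_ ?_ ?_ ?_ h4 h5 ?_
          · have hdec := pvPhi_dec_mem graph c anc rest closed
              ((pvGet graph c).filter (fun ch => !(PySem.Set.contains closed ch)))
              (fun ch hch => pvGet_subset_U graph c ch (List.mem_filter.1 hch).1)
              (le_trans (Nat.add_le_add_right (List.length_filter_le _ _) 2) (pvGet_len_le graph c))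
              (fun ch hch => (hkid ch hch).2) hcl
            omega
          · rw [pvNames_append_kids, pvDsd_append, pvDsd_nil_of_sub _ _
              (fun x hx => List.mem_append.2 (Or.inl (hkid x hx).1)), List.append_nil]
          · intro x
            rw [h2 x, hnames, pvNames_append_kids]
            constructor
            · rintro (h | h)
              · exact Or.inl h
              · rcases List.mem_cons.1 h with rfl | h
                · exact Or.inl hcl
                · exact Or.inr (List.mem_append.2 (Or.inl h))
            · rintro (h | h)
              · exact Or.inl h
              · rcases List.mem_append.1 h with h | h
                · exact Or.inr (List.mem_cons_of_mem _ h)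
                · exact Or.inr (List.mem_cons_of_mem _ (hkid x h).1)
          · intro x hx ch hch hnc2
            have hmo := h3 x hx ch hch hnc2
            rw [hnames] at hmo
            rw [pvNames_append_kids]
            rcases List.mem_cons.1 hmo with rfl | h
            · exact absurd hcl hnc2
            · exact List.mem_append.2 (Or.inl h)
          · refine pvChains_append closed parent _ _ _ ?_ ?_
            · refine pvChains_shadow closed parent rest [c] [] ?_ hchrest
              intro x hx
              rcases List.mem_cons.1 hx with rfl | hx
              · exact Or.inr hcl
              · simp at hx
            · refine pvChains_of_shadowed closed parent _ _ ?_
              intro pr hpr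
              obtain ⟨ch, hch, rfl⟩ := List.mem_map.1 hpr
              exact Or.inl (List.mem_append.2 (Or.inl (hkid ch hch).1))
        · -- first pop of c: the bridge pops it too and discovers c's fresh children
          have hadd : PySem.Set.add closed c = closed ++ [c] := PySem.Set.add_of_not_mem hcl
          obtain ⟨hnd, hanc, hw⟩ := hob (by simp) hcl
          rw [hnames] at h1
          simp only [pvDsd, if_neg hcl] at h1
          have hS : ∀ x, PySem.Dict.contains parent x = true ↔ x ∈ closed ++ c :: pvNames rest := by
            intro x
            rw [h2 x, hnames]
            simp [List.mem_append]
          obtain ⟨sp1, sp2, sp3, sp4, sp5⟩ := pvStepB_spec graph c (pvGet graph c) parent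
            (pvDsd (c :: closed) (pvNames rest)) (closed ++ c :: pvNames rest) hS h5
          have hkidmem : ∀ ch, ch ∈ (pvGet graph c).filter
              (fun ch => !(PySem.Set.contains (closed ++ [c]) ch))
              ↔ ch ∈ pvGet graph c ∧ ch ∉ closed ++ [c] := by
            intro ch
            rw [List.mem_filter]
            constructor
            · rintro ⟨hg, hb⟩
              exact ⟨hg, mt (PySem.Set.contains_iff _ ch).mpr
                (by rw [Bool.not_eq_true'] at hb; rw [hb]; simp)⟩
            · rintro ⟨hg, hm⟩
              refine ⟨hg, ?_⟩
              have hf : PySem.Set.contains (closed ++ [c]) ch = false := by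
                rw [← Bool.not_eq_true]
                exact fun h => hm ((PySem.Set.contains_iff _ _).1 h)
              rw [hf]
              rfl
          have hwalkmem : ∀ y ∈ c :: anc, PySem.Dict.contains parent y = true := by
            intro y hy
            rw [h2 y]
            rcases List.mem_cons.1 hy with rfl | hy
            · exact Or.inr (by rw [hnames]; exact List.mem_cons_self ..)
            · exact Or.inl (hanc y hy)
          have hwc' : ∀ f : Nat, (c :: anc).length ≤ f →
              pvWalk ((pvGet graph c).foldl (fun pq ch =>
                if PySem.Dict.contains pq.1 ch then pq
                else (PySem.Dict.insert pq.1 ch (some c), pq.2 ++ [ch]))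
                (parent, pvDsd (c :: closed) (pvNames rest))).1 f (some c) = c :: anc := by
            intro f hf
            refine pvWalk_congr parent _ f c _ (hw f hf) hwalkmem ?_
            intro y hcy
            rw [PySem.Dict.getD_eq_get?_getD, PySem.Dict.getD_eq_get?_getD, sp3 y hcy]
          rw [pvLoopA]
          simp only [if_neg hcg, hadd]
          rw [h1, pvLoopB]
          simp only [if_neg hcg, pvStepB]
          refine ih _ (closed ++ [c]) _ _ ?_ ?_ ?_ ?_ ?_ sp5 ?_
          · have hdec := pvPhi_dec_not_mem graph c anc rest closed
              ((pvGet graph c).filter (fun ch => !(PySem.Set.contains (closed ++ [c]) ch)))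
              (fun ch hch => pvGet_subset_U graph c ch (List.mem_filter.1 hch).1)
              (le_trans (Nat.add_le_add_right (List.length_filter_le _ _) 2) (pvGet_len_le graph c))
              (fun ch hch => ((hkidmem ch).1 hch).2) hcl
            omega
          · rw [sp2, pvNames_append_kids, pvDsd_append]
            rw [pvDsd_filter _ _ _ (fun x hx => by
              have hcx : PySem.Set.contains (closed ++ [c]) x = true := by
                revert hx
                cases PySem.Set.contains (closed ++ [c]) x <;> simp
              exact List.mem_append.2 (Or.inr ((PySem.Set.contains_iff _ _).1 hcx)))]
            rw [pvDsd_congr (pvNames rest ++ (closed ++ [c]))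
              (closed ++ c :: pvNames rest) _ (by
                intro y
                simp only [List.mem_append, List.mem_cons]
                tauto)]
            rw [pvDsd_congr (closed ++ [c]) (c :: closed) _ (by
              intro y
              simp only [List.mem_append, List.mem_cons]
              tauto)]
          · intro x
            rw [sp1 x, pvNames_append_kids]
            constructor
            · rintro (h | h)
              · rcases List.mem_append.1 h with h | h
                · exact Or.inl (List.mem_append.2 (Or.inl h))
                · rcases List.mem_cons.1 h with rfl | h
                  · exact Or.inl (List.mem_append.2 (Or.inr (List.mem_singleton.2 rfl)))
                  · exact Or.inr (List.mem_append.2 (Or.inl h))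
              · by_cases hmem : x ∈ closed ++ [c]
                · exact Or.inl hmem
                · exact Or.inr (List.mem_append.2 (Or.inr ((hkidmem x).2 ⟨h, hmem⟩)))
            · rintro (h | h)
              · rcases List.mem_append.1 h with h | h
                · exact Or.inl (List.mem_append.2 (Or.inl h))
                · rw [List.mem_singleton.1 h]
                  exact Or.inl (List.mem_append.2 (Or.inr (List.mem_cons_self ..)))
              · rcases List.mem_append.1 h with h | h
                · exact Or.inl (List.mem_append.2 (Or.inr (List.mem_cons_of_mem _ h)))
                · exact Or.inr ((hkidmem x).1 h).1
          · intro x hx ch hch hnc2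
            rw [pvNames_append_kids]
            rcases List.mem_append.1 hx with hx | hx
            · have hncl : ch ∉ closed := fun h => hnc2 (List.mem_append.2 (Or.inl h))
              have hmo := h3 x hx ch hch hncl
              rw [hnames] at hmo
              rcases List.mem_cons.1 hmo with h | h
              · exact absurd (List.mem_append.2 (Or.inr (by simp [h]))) hnc2
              · exact List.mem_append.2 (Or.inl h)
            · rw [List.mem_singleton.1 hx] at hch
              exact List.mem_append.2 (Or.inr ((hkidmem ch).2 ⟨hch, hnc2⟩))
          · intro hmem
            rcases List.mem_append.1 hmem with h | h
            · exact h4 h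
            · exact hcg (List.mem_singleton.1 h).symm
          · refine pvChains_append _ _ _ _ _ ?_ ?_
            · refine pvChains_update closed (closed ++ [c]) parent _ rest [c] [] ?_ ?_ ?_ hchrest
              · intro x hx
                rcases List.mem_cons.1 hx with rfl | hx
                · exact Or.inr (List.mem_append.2 (Or.inr (List.mem_singleton.2 rfl)))
                · simp at hx
              · intro x hx
                exact List.mem_append.2 (Or.inl hx)
              · intro c2 anc2 hm hc2 hanc2 hwalk2
                intro f hf
                refine pvWalk_congr parent _ f c2 _ (hwalk2 f hf) ?_ ?_
                · intro y hy
                  rw [h2 y]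
                  rcases List.mem_cons.1 hy with h | hy
                  · refine Or.inr ?_
                    rw [hnames, h]
                    exact List.mem_cons_of_mem _ (List.mem_map.2 ⟨(c2, anc2), hm, rfl⟩)
                  · exact Or.inl (hanc2 y hy)
                · intro y hcy
                  rw [PySem.Dict.getD_eq_get?_getD, PySem.Dict.getD_eq_get?_getD, sp3 y hcy]
            · refine pvChains_kids (closed ++ [c]) _ c anc hwc' hnd
                (List.mem_append.2 (Or.inr (List.mem_singleton.2 rfl)))
                (fun a ha => List.mem_append.2 (Or.inl (hanc a ha))) _ _ ?_
              intro ch hch hchs hchc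
              rw [PySem.Dict.getD_eq_get?_getD]
              rw [sp4 ch ((hkidmem ch).1 hch).1 (by
                intro hmem
                rcases List.mem_append.1 hmem with h | h
                · exact hchc (List.mem_append.2 (Or.inl h))
                · rcases List.mem_cons.1 h with rfl | h
                  · exact hchc (List.mem_append.2 (Or.inr (List.mem_singleton.2 rfl)))
                  · exact hchs (List.mem_append.2 (Or.inl (by simpa [pvNames] using h))))]
              rfl

-- ——— bridge = layered loop ———

-- the chain invariant on the layered side: x's parent-walk is defined, acyclic, and its
-- reverse is exactly B's back-to-front reconstruction through the earlier layers
def pvChainP (graph : List (String × List String))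
    (parent : PySem.Dict String (Option String)) (earlier : List (List String))
    (x : String) : Prop :=
  ∃ L : List String, (∀ f : Nat, L.length ≤ f → pvWalk parent f (some x) = L) ∧
    L.reverse = pvBuildC graph earlier [x] ∧ L.Nodup ∧
    (∀ y ∈ L, PySem.Dict.contains parent y = true)

lemma pvBuildC_append (graph : List (String × List String)) :
    ∀ (e : List (List String)) (pr t : List String), pr ≠ [] →
      pvBuildC graph e (pr ++ t) = pvBuildC graph e pr ++ t := by
  intro e
  induction e with
  | nil => intro pr t _; rfl
  | cons layer rest ih =>
    intro pr t hpr
    simp only [pvBuildC]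
    have hh : (pr ++ t).headD "" = pr.headD "" := by
      cases pr with
      | nil => exact absurd rfl hpr
      | cons a pr => rfl
    rw [hh, ← List.cons_append, ih _ _ (by simp)]

lemma pvFirstAdj_cons_pos (graph : List (String × List String)) (x u : String)
    (L : List String) (h : (pvGet graph u).contains x = true) :
    pvFirstAdj graph x (u :: L) = u := by
  unfold pvFirstAdj
  rw [List.find?_cons_of_pos (p := fun u => (pvGet graph u).contains x) h]

lemma pvFirstAdj_cons_neg (graph : List (String × List String)) (x u : String)
    (L : List String) (h : (pvGet graph u).contains x = false) :
    pvFirstAdj graph x (u :: L) = pvFirstAdj graph x L := by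
  unfold pvFirstAdj
  rw [List.find?_cons_of_neg (p := fun u => (pvGet graph u).contains x)
    (by simp only [h]; exact Bool.false_ne_true)]

lemma pvChain_len_le (p : PySem.Dict String (Option String)) (L : List String)
    (hnd : L.Nodup) (hk : ∀ y ∈ L, PySem.Dict.contains p y = true) :
    L.length ≤ PySem.Dict.size p := by
  have e1 := List.toFinset_card_of_nodup hnd
  have e2 : L.toFinset ⊆ (PySem.Dict.keys p).toFinset := by
    intro y hy
    rw [List.mem_toFinset] at hy ⊢
    rw [← PySem.Dict.contains_iff_mem_keys]
    exact hk y hy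
  have e3 := Finset.card_le_card e2
  have e4 := List.toFinset_card_le (PySem.Dict.keys p)
  have e5 : (PySem.Dict.keys p).length = PySem.Dict.size p := by
    simp [PySem.Dict.keys, PySem.Dict.size]
  omega

lemma pvChainP_mono (graph : List (String × List String)) (earlier : List (List String))
    (x : String) (p P1 : PySem.Dict String (Option String))
    (h : pvChainP graph p earlier x)
    (hstab : ∀ y, PySem.Dict.contains p y = true →
      PySem.Dict.get? P1 y = PySem.Dict.get? p y)
    (hmono : ∀ y, PySem.Dict.contains p y = true → PySem.Dict.contains P1 y = true) :
    pvChainP graph P1 earlier x := by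
  obtain ⟨L, hw, hrev, hnd, hk⟩ := h
  refine ⟨L, ?_, hrev, hnd, fun y hy => hmono y (hk y hy)⟩
  intro f hf
  refine pvWalk_congr p P1 f x L (hw f hf) hk ?_
  intro y hy
  rw [PySem.Dict.getD_eq_get?_getD, PySem.Dict.getD_eq_get?_getD, hstab y hy]

-- one node's discovery step, on both sides at once: the bridge's dict fold and B's
-- seen-set fold append the same fresh names D, in the same order
lemma pvNodeStep (u : String) :
    ∀ (cs : List String) (p : PySem.Dict String (Option String)) (s : List String),
      (∀ x, PySem.Dict.contains p x = true ↔ x ∈ s) →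
      (PySem.Dict.keys p).Nodup →
      ∃ (P1 : PySem.Dict String (Option String)) (D : List String),
        (∀ q : List String, cs.foldl (fun pq ch =>
            if PySem.Dict.contains pq.1 ch then pq
            else (PySem.Dict.insert pq.1 ch (some u), pq.2 ++ [ch])) (p, q) = (P1, q ++ D)) ∧
        (∀ a : List String, cs.foldl (fun sf v =>
            if PySem.Set.contains sf.1 v then sf
            else (PySem.Set.add sf.1 v, sf.2 ++ [v])) (s, a) = (s ++ D, a ++ D)) ∧
        (∀ x, PySem.Dict.contains P1 x = true ↔ x ∈ s ++ D) ∧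
        (PySem.Dict.keys P1).Nodup ∧
        (∀ y, PySem.Dict.contains p y = true → PySem.Dict.get? P1 y = PySem.Dict.get? p y) ∧
        (∀ x ∈ D, x ∉ s ∧ x ∈ cs ∧ PySem.Dict.get? P1 x = some (some u)) ∧
        (∀ x ∈ cs, x ∉ s → x ∈ D) := by
  intro cs
  induction cs with
  | nil =>
    intro p s hps hnd
    exact ⟨p, [], fun q => by simp, fun a => by simp, fun x => by simpa using hps x, hnd,
      fun y _ => rfl, by simp, by simp⟩
  | cons v cs ih =>
    intro p s hps hnd
    by_cases hv : v ∈ s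
    · have hcp : PySem.Dict.contains p v = true := (hps v).2 hv
      have hcs : PySem.Set.contains s v = true := (PySem.Set.contains_iff s v).2 hv
      obtain ⟨P1, D, hB, hC, i1, i2, i3, i4, i5⟩ := ih p s hps hnd
      refine ⟨P1, D, ?_, ?_, i1, i2, i3, ?_, ?_⟩
      · intro q; simp only [List.foldl_cons, if_pos hcp]; exact hB q
      · intro a; simp only [List.foldl_cons, if_pos hcs]; exact hC a
      · intro x hx
        obtain ⟨hx1, hx2, hx3⟩ := i4 x hx
        exact ⟨hx1, List.mem_cons_of_mem _ hx2, hx3⟩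
      · intro x hx hxs
        rcases List.mem_cons.1 hx with rfl | hx
        · exact absurd hv hxs
        · exact i5 x hx hxs
    · have hcp : ¬ PySem.Dict.contains p v = true := fun h => hv ((hps v).1 h)
      have hcs : ¬ PySem.Set.contains s v = true :=
        fun h => hv ((PySem.Set.contains_iff s v).1 h)
      have hadd : PySem.Set.add s v = s ++ [v] := PySem.Set.add_of_not_mem hv
      have hps' : ∀ x, PySem.Dict.contains (PySem.Dict.insert p v (some u)) x = true
          ↔ x ∈ s ++ [v] := by
        intro x
        rw [PySem.Dict.contains_insert]
        simp only [List.mem_append, List.mem_singleton, Bool.or_eq_true, beq_iff_eq]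
        rw [hps x]
        tauto
      have hnd' := PySem.Dict.nodup_keys_insert p v (some u) hnd
      obtain ⟨P1, D, hB, hC, i1, i2, i3, i4, i5⟩ :=
        ih (PySem.Dict.insert p v (some u)) (s ++ [v]) hps' hnd'
      refine ⟨P1, v :: D, ?_, ?_, ?_, i2, ?_, ?_, ?_⟩
      · intro q
        simp only [List.foldl_cons, if_neg hcp]
        rw [hB (q ++ [v])]
        simp
      · intro a
        simp only [List.foldl_cons, if_neg hcs, hadd]
        rw [hC (a ++ [v])]
        simp
      · intro x
        rw [i1 x]
        simp only [List.mem_append, List.mem_singleton, List.mem_cons]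
        tauto
      · intro y hy
        have hyne : y ≠ v := fun h => hcp (h ▸ hy)
        have : PySem.Dict.contains (PySem.Dict.insert p v (some u)) y = true := by
          rw [PySem.Dict.contains_insert]; simp [hy]
        rw [i3 y this]
        exact PySem.Dict.get?_insert_of_ne _ _ hyne
      · intro x hx
        rcases List.mem_cons.1 hx with rfl | hx
        · refine ⟨hv, List.mem_cons_self .., ?_⟩
          rw [i3 x (PySem.Dict.contains_insert_self _ _ _)]
          exact PySem.Dict.get?_insert_self ..
        · obtain ⟨hx1, hx2, hx3⟩ := i4 x hx
          exact ⟨fun h => hx1 (List.mem_append.2 (Or.inl h)), List.mem_cons_of_mem _ hx2, hx3⟩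
      · intro x hx hxs
        rcases List.mem_cons.1 hx with rfl | hx
        · exact List.mem_cons_self ..
        · by_cases hxv : x = v
          · exact hxv ▸ List.mem_cons_self ..
          · refine List.mem_cons_of_mem _ (i5 x hx ?_)
            simp only [List.mem_append, List.mem_singleton]
            rintro (h | h)
            · exact hxs h
            · exact hxv h

-- running the bridge through one whole layer: either the goal is in the layer and the
-- bridge returns its reconstructed path, or the bridge's state advances exactly as B's
-- pvExpand does
lemma pvLayerRun (graph : List (String × List String)) (goal : String)
    (earlier : List (List String)) :
    ∀ (Lc F : List String) (p : PySem.Dict String (Option String)) (s : List String),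
      (∀ x, PySem.Dict.contains p x = true ↔ x ∈ s) →
      (PySem.Dict.keys p).Nodup →
      (∀ x ∈ Lc, pvChainP graph p earlier x) →
      (goal ∈ Lc → pvLoopB graph goal p (Lc ++ F) = some (pvBuildC graph earlier [goal])) ∧
      (goal ∉ Lc → ∃ (P' : PySem.Dict String (Option String)) (Fr : List String),
        (∀ a, pvExpand graph Lc (s, a) = (s ++ Fr, a ++ Fr)) ∧
        pvLoopB graph goal p (Lc ++ F) = pvLoopB graph goal P' (F ++ Fr) ∧
        (∀ x, PySem.Dict.contains P' x = true ↔ x ∈ s ++ Fr) ∧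
        (PySem.Dict.keys P').Nodup ∧
        (∀ y, PySem.Dict.contains p y = true →
          PySem.Dict.get? P' y = PySem.Dict.get? p y) ∧
        (∀ x ∈ Fr, x ∉ s ∧ x ∈ pvU graph ∧ pvFirstAdj graph x Lc ∈ Lc ∧
          PySem.Dict.get? P' x = some (some (pvFirstAdj graph x Lc)))) := by
  intro Lc
  induction Lc with
  | nil =>
    intro F p s hps hnd _
    refine ⟨by simp, fun _ => ⟨p, [], fun a => by simp [pvExpand], by simp, ?_, hnd,
      fun y _ => rfl, by simp⟩⟩
    intro x
    simpa using hps x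
  | cons u Lc ih =>
    intro F p s hps hnd hch
    obtain ⟨P1, D, hB, hC, j1, j2, j3, j4, j5⟩ := pvNodeStep u (pvGet graph u) p s hps hnd
    have hstep : pvStepB graph u (p, Lc ++ F) = (P1, Lc ++ (F ++ D)) := by
      rw [pvStepB, hB (Lc ++ F)]
      simp
    have hchain1 : ∀ x ∈ Lc, pvChainP graph P1 earlier x := by
      intro x hx
      refine pvChainP_mono graph earlier x p P1 (hch x (List.mem_cons_of_mem _ hx)) j3 ?_
      intro y hy
      rw [j1 y]
      exact List.mem_append.2 (Or.inl ((hps y).1 hy))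
    constructor
    · intro hg
      by_cases hug : u = goal
      · subst hug
        obtain ⟨L, hw, hrev, hndL, hkL⟩ := hch u (List.mem_cons_self ..)
        have hlen : L.length ≤ PySem.Dict.size p + 1 := by
          have := pvChain_len_le p L hndL hkL
          omega
        rw [List.cons_append, pvLoopB]
        simp [hw _ hlen, hrev]
      · have hg' : goal ∈ Lc := by
          rcases List.mem_cons.1 hg with h | h
          · exact absurd h.symm hug
          · exact h
        rw [List.cons_append, pvLoopB]
        simp only [if_neg hug]
        rw [hstep]
        exact (ih (F ++ D) P1 (s ++ D) j1 j2 hchain1).1 hg'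
    · intro hg
      have hug : u ≠ goal := fun h => hg (h ▸ List.mem_cons_self ..)
      have hg' : goal ∉ Lc := fun h => hg (List.mem_cons_of_mem _ h)
      obtain ⟨P', Fr', k1, k2, k3, k4, k5, k6⟩ :=
        (ih (F ++ D) P1 (s ++ D) j1 j2 hchain1).2 hg'
      refine ⟨P', D ++ Fr', ?_, ?_, ?_, k4, ?_, ?_⟩
      · intro a
        have h1 : pvExpand graph (u :: Lc) (s, a) = pvExpand graph Lc (s ++ D, a ++ D) := by
          simp only [pvExpand, List.foldl_cons]
          rw [hC a]
        rw [h1, k1 (a ++ D)]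
        simp
      · rw [List.cons_append, pvLoopB]
        simp only [if_neg hug]
        rw [hstep, k2]
        simp
      · intro x
        rw [k3 x]
        simp [List.mem_append]
      · intro y hy
        have h1 : PySem.Dict.contains P1 y = true := by
          rw [j1 y]
          exact List.mem_append.2 (Or.inl ((hps y).1 hy))
        rw [k5 y h1, j3 y hy]
      · intro x hx
        rcases List.mem_append.1 hx with hx | hx
        · obtain ⟨hx1, hx2, hx3⟩ := j4 x hx
          have hcontains : (pvGet graph u).contains x = true := by
            simpa using hx2
          have hfa : pvFirstAdj graph x (u :: Lc) = u :=
            pvFirstAdj_cons_pos graph x u Lc hcontains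
          refine ⟨hx1, pvGet_subset_U graph u x hx2, by rw [hfa]; exact List.mem_cons_self ..,
            ?_⟩
          rw [hfa]
          have h1 : PySem.Dict.contains P1 x = true := by
            rw [j1 x]
            exact List.mem_append.2 (Or.inr hx)
          rw [k5 x h1, hx3]
        · obtain ⟨hx1, hx2, hx3, hx4⟩ := k6 x hx
          have hxs : x ∉ s := fun h => hx1 (List.mem_append.2 (Or.inl h))
          have hnadj : (pvGet graph u).contains x = false := by
            rw [Bool.eq_false_iff]
            intro h
            have : x ∈ pvGet graph u := by simpa using h
            exact hx1 (List.mem_append.2 (Or.inr (j5 x this hxs)))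
          have hfa : pvFirstAdj graph x (u :: Lc) = pvFirstAdj graph x Lc :=
            pvFirstAdj_cons_neg graph x u Lc hnadj
          exact ⟨hxs, hx2, by rw [hfa]; exact List.mem_cons_of_mem _ hx3, by rw [hfa]; exact hx4⟩

lemma pv_mainC (graph : List (String × List String)) (goal : String) :
    ∀ (N : Nat) (layer : List String) (earlier : List (List String))
      (s : List String) (p : PySem.Dict String (Option String)),
      pvCountC graph s < N →
      (∀ x, PySem.Dict.contains p x = true ↔ x ∈ s) →
      (PySem.Dict.keys p).Nodup →
      (∀ x ∈ layer, pvChainP graph p earlier x) →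
      (goal ∈ s → goal ∈ layer) →
      pvLoopB graph goal p layer = pvLoopC graph goal layer earlier s := by
  intro N
  induction N with
  | zero => intro layer earlier s p hN; omega
  | succ N ih =>
    intro layer earlier s p hN hps hnd hch hgs
    rw [pvLoopC]
    by_cases hg : goal ∈ layer
    · rw [if_pos (by simpa using hg)]
      have := (pvLayerRun graph goal earlier layer [] p s hps hnd hch).1 hg
      simpa using this
    · rw [if_neg (by simpa using hg)]
      obtain ⟨P', Fr, k1, k2, k3, k4, k5, k6⟩ :=
        (pvLayerRun graph goal earlier layer [] p s hps hnd hch).2 hg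
      have hexp : pvExpand graph layer (s, []) = (s ++ Fr, Fr) := by
        rw [k1 []]
        simp
      rw [hexp]
      have hrun : pvLoopB graph goal p layer = pvLoopB graph goal P' Fr := by
        have := k2
        simpa using this
      by_cases hFr : Fr = []
      · subst hFr
        rw [hrun, pvLoopB]
        simp
      · simp only [if_neg hFr]
        rw [hrun]
        refine ih Fr (layer :: earlier) (s ++ Fr) P' ?_ k3 k4 ?_ ?_
        · obtain ⟨x0, hx0⟩ := List.exists_mem_of_ne_nil Fr hFr
          obtain ⟨hx1, hx2, _, _⟩ := k6 x0 hx0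
          have := pvCountC_lt graph s (s ++ Fr)
            (fun x hx => List.mem_append.2 (Or.inl hx)) x0 hx2 hx1
            (List.mem_append.2 (Or.inr hx0))
          omega
        · intro x hx
          obtain ⟨hx1, hx2, hx3, hx4⟩ := k6 x hx
          obtain ⟨Lu, hwu, hrevu, hndu, hku⟩ := hch _ hx3
          have hwu' : ∀ f : Nat, Lu.length ≤ f →
              pvWalk P' f (some (pvFirstAdj graph x layer)) = Lu := by
            intro f hf
            refine pvWalk_congr p P' f _ Lu (hwu f hf) hku ?_
            intro y hy
            rw [PySem.Dict.getD_eq_get?_getD, PySem.Dict.getD_eq_get?_getD, k5 y hy]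
          refine ⟨x :: Lu, ?_, ?_, ?_, ?_⟩
          · intro f hf
            match f, hf with
            | f + 1, hf =>
              simp only [pvWalk]
              rw [PySem.Dict.getD_eq_get?_getD, hx4]
              simp only [Option.getD_some]
              exact congrArg _ (hwu' f (by simpa using Nat.le_of_succ_le_succ hf))
          · show (x :: Lu).reverse = pvBuildC graph (layer :: earlier) [x]
            have h1 : pvBuildC graph (layer :: earlier) [x] =
                pvBuildC graph earlier [pvFirstAdj graph x layer, x] := by
              simp [pvBuildC]
            rw [h1]
            have h2 : ([pvFirstAdj graph x layer, x] : List String) =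
                [pvFirstAdj graph x layer] ++ [x] := rfl
            rw [h2, pvBuildC_append graph earlier _ _ (by simp), ← hrevu]
            simp
          · refine List.nodup_cons.2 ⟨?_, hndu⟩
            intro hmem
            exact hx1 ((hps x).1 (hku x hmem))
          · intro y hy
            rcases List.mem_cons.1 hy with rfl | hy
            · exact (k3 y).2 (List.mem_append.2 (Or.inr hx))
            · exact (k3 y).2 (List.mem_append.2 (Or.inl ((hps y).1 (hku y hy))))
        · intro hmem
          rcases List.mem_append.1 hmem with h | h
          · exact absurd (hgs h) hg
          · exact h

-- ===== VERDICT =====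
theorem ao_star_spec : Claim_equal_ao_star := by
  unfold Claim_equal_ao_star
  intro start_name goal_name graph heuristics _
  unfold Spec_ao_star ao_star ao_star_alt
  have hof : PySem.Set.ofList [start_name] = [start_name] := by
    simp [PySem.Set.ofList, PySem.Set.add, PySem.Set.contains]
  have hB : pvLoopA graph goal_name [(start_name, [])] PySem.Set.empty =
      pvLoopB graph goal_name (PySem.Dict.mk [(start_name, none)]) [start_name] := by
    refine pv_main graph goal_name (pvPhi graph [(start_name, [])] [])
      [(start_name, [])] [] (PySem.Dict.mk [(start_name, none)]) [start_name]
      le_rfl ?_ ?_ ?_ ?_ ?_ ?_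
    · simp [pvDsd, pvNames]
    · intro x
      simp [pvNames, PySem.Dict.contains]
      exact eq_comm
    · intro x hx
      simp at hx
    · simp
    · simp [PySem.Dict.keys]
    · refine ⟨fun _ _ => ⟨by simp, by simp, ?_⟩, trivial⟩
      intro f hf
      match f, hf with
      | f + 1, _ =>
        simp only [pvWalk]
        have hg : PySem.Dict.getD (PySem.Dict.mk [(start_name, (none : Option String))])
            start_name none = none := by
          rw [PySem.Dict.getD_eq_get?_getD, PySem.Dict.get?_mk_cons]
          simp
        rw [hg]
        cases f <;> simp [pvWalk]
  have hstart_walk : ∀ f : Nat, ([start_name] : List String).length ≤ f →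
      pvWalk (PySem.Dict.mk [(start_name, none)]) f (some start_name) = [start_name] := by
    intro f hf
    match f, hf with
    | f + 1, _ =>
      simp only [pvWalk]
      have hg : PySem.Dict.getD (PySem.Dict.mk [(start_name, (none : Option String))])
          start_name none = none := by
        rw [PySem.Dict.getD_eq_get?_getD, PySem.Dict.get?_mk_cons]
        simp
      rw [hg]
      cases f <;> simp [pvWalk]
  have hC : pvLoopB graph goal_name (PySem.Dict.mk [(start_name, none)]) [start_name] =
      pvLoopC graph goal_name [start_name] [] [start_name] := by
    refine pv_mainC graph goal_name (pvCountC graph [start_name] + 1)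
      [start_name] [] [start_name] (PySem.Dict.mk [(start_name, none)])
      (by omega) ?_ ?_ ?_ (fun h => h)
    · intro x
      simp [PySem.Dict.contains]
      exact eq_comm
    · simp [PySem.Dict.keys]
    · intro x hx
      rcases List.mem_singleton.1 hx with rfl
      exact ⟨[x], hstart_walk, by simp [pvBuildC], by simp, by
        intro y hy
        rcases List.mem_singleton.1 hy with rfl
        simp [PySem.Dict.contains]⟩
  rw [hB, hC, hof]
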